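-- pv_equiv track=rewrite | github.com/lssfau/walberla | python/waLBerla/tools/source_checker/walberla_check.py | splitUpIncludes
-- ===== SOURCE A (Python) =====
-- def splitUpIncludes(includes):
--     result = []
--
--     result.append(includes[0])
--
--     for i in range(1, len(includes)):
--         cur = includes[i]
--         last = includes[i - 1]
--         curHasSlash = '/' in cur
--         lastHasSlash = '/' in last
--         if (not curHasSlash and lastHasSlash) or (curHasSlash and not lastHasSlash):
--             result.append("")
--         if curHasSlash and lastHasSlash:
--             lastModule = last.split('/')[0]
--             curModule = cur.split('/')[0]
--             if lastModule != curModule: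
--                 result.append("")
--
--         result.append(cur)
--
--     return result
-- ===== SOURCE B (Python) =====
-- def splitUpIncludes(includes):
--     def key(s):
--         return s.split('/')[0] if '/' in s else None
--
--     groups = []
--     for s in includes:
--         k = key(s)
--         if groups and groups[-1][0] == k:
--             groups[-1][1].append(s)
--         else:
--             groups.append((k, [s]))
--
--     out = []
--     for _, g in groups:
--         if out:
--             out.append("")
--         out += g
--     return out
-- ===== Notes on version B (the rewrite author's own statement) =====
-- stated objective: alternative
-- what changed: B replaces A's index-based loop that compares each element with its predecessor by a group-then-join decomposition: it collects consecutive runs with equal module key (first path component, or None without a slash) and then joins the runs with one "" separator between groups.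
import Mathlib
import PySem

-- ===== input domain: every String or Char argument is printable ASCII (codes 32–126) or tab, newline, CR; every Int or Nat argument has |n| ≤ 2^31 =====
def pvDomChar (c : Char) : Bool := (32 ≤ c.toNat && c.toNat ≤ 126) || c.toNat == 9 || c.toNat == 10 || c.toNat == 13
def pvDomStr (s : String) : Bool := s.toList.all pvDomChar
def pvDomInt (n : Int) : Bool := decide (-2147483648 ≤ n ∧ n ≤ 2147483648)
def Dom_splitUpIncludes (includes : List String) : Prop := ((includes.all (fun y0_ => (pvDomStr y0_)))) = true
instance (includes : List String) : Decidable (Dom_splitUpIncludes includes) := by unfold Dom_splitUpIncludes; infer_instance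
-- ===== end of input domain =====

-- B replaces A's index-based adjacent-pair loop by a group-then-join decomposition
-- (collect consecutive runs with equal module key, then join the runs with "" separators);
-- objective: alternative decomposition, same cost.

-- ===== PORT A =====
def splitUpIncludes (includes : List String) : List String :=
  let result : List String := []
  let result := result ++ [PySem.List.pyGetD includes 0 ""]
  (PySem.List.pyRange 1 (includes.length : Int) 1).foldl
    (fun result i =>
      let cur := PySem.List.pyGetD includes i ""
      let last := PySem.List.pyGetD includes (i - 1) ""
      let curHasSlash := PySem.Str.isIn "/" cur
      let lastHasSlash := PySem.Str.isIn "/" last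
      let result := if (!curHasSlash && lastHasSlash) || (curHasSlash && !lastHasSlash) then result ++ [""] else result
      let result :=
        if curHasSlash && lastHasSlash then
          let lastModule := PySem.List.pyGetD ((PySem.Str.split? last "/").getD []) 0 ""
          let curModule := PySem.List.pyGetD ((PySem.Str.split? cur "/").getD []) 0 ""
          if lastModule ≠ curModule then result ++ [""] else result
        else result
      result ++ [cur])
    result

-- ===== PORT B =====
-- key(s) = s.split('/')[0] if '/' in s else None
def pvKeyOf (s : String) : Option String :=
  if PySem.Str.isIn "/" s then some (PySem.List.pyGetD ((PySem.Str.split? s "/").getD []) 0 "") else none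

-- one iteration of B's grouping loop (groups[-1] is the last group)
def pvAddToGroups (groups : List (Option String × List String)) (s : String) :
    List (Option String × List String) :=
  let k := pvKeyOf s
  match groups.getLast? with
  | some lastG =>
      if lastG.1 = k then groups.dropLast ++ [(lastG.1, lastG.2 ++ [s])]
      else groups ++ [(k, [s])]
  | none => groups ++ [(k, [s])]

def splitUpIncludes_alt (includes : List String) : List String :=
  let groups := includes.foldl pvAddToGroups []
  groups.foldl (fun out g => (if out ≠ [] then out ++ [""] else out) ++ g.2) []

-- ===== PRECONDITION & SPEC =====
-- Pre_ excludes only the empty list, on which Python A raises IndexError (includes[0]).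
def Pre_splitUpIncludes (includes : List String) : Prop := includes ≠ []
instance (includes : List String) : Decidable (Pre_splitUpIncludes includes) := by unfold Pre_splitUpIncludes; infer_instance
def pvWitness_splitUpIncludes : List String := ["core/a.h", "core/b.h", "field/f.h", "vector"]

def Spec_splitUpIncludes (includes : List String) (out : List String) : Prop := out = splitUpIncludes_alt includes
instance (includes : List String) (out : List String) : Decidable (Spec_splitUpIncludes includes out) := by unfold Spec_splitUpIncludes; infer_instance

-- ===== CLAIM (what is proved, stated in full; the proofs are below) =====
def Claim_equal_splitUpIncludes : Prop := ∀ (includes : List String), Dom_splitUpIncludes includes → Pre_splitUpIncludes includes → Spec_splitUpIncludes includes (splitUpIncludes includes)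

-- ===== LEMMAS AND PROOFS =====

-- A's loop body, with the scanned list as an explicit parameter
def pvStepA (includes : List String) (result : List String) (i : Int) : List String :=
  let cur := PySem.List.pyGetD includes i ""
  let last := PySem.List.pyGetD includes (i - 1) ""
  let curHasSlash := PySem.Str.isIn "/" cur
  let lastHasSlash := PySem.Str.isIn "/" last
  let result := if (!curHasSlash && lastHasSlash) || (curHasSlash && !lastHasSlash) then result ++ [""] else result
  let result :=
    if curHasSlash && lastHasSlash then
      let lastModule := PySem.List.pyGetD ((PySem.Str.split? last "/").getD []) 0 ""
      let curModule := PySem.List.pyGetD ((PySem.Str.split? cur "/").getD []) 0 ""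
      if lastModule ≠ curModule then result ++ [""] else result
    else result
  result ++ [cur]

lemma splitUpIncludes_eq (includes : List String) :
    splitUpIncludes includes =
      (PySem.List.pyRange 1 (includes.length : Int) 1).foldl (pvStepA includes)
        [PySem.List.pyGetD includes 0 ""] := rfl

-- A's two separator tests are exactly "the keys differ"
lemma pvStepA_sep (R : List String) (last cur : String) :
    (let curHasSlash := PySem.Str.isIn "/" cur
     let lastHasSlash := PySem.Str.isIn "/" last
     let result := if (!curHasSlash && lastHasSlash) || (curHasSlash && !lastHasSlash) then R ++ [""] else R
     if curHasSlash && lastHasSlash then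
        let lastModule := PySem.List.pyGetD ((PySem.Str.split? last "/").getD []) 0 ""
        let curModule := PySem.List.pyGetD ((PySem.Str.split? cur "/").getD []) 0 ""
        if lastModule ≠ curModule then result ++ [""] else result
     else result) =
      R ++ (if pvKeyOf last = pvKeyOf cur then [] else [""]) := by
  by_cases hl : PySem.Str.isIn "/" last = true <;>
  by_cases hc : PySem.Str.isIn "/" cur = true <;>
    simp [pvKeyOf] <;> split_ifs <;> simp_all

def pvGroupsOf (includes : List String) : List (Option String × List String) :=
  includes.foldl pvAddToGroups []

def pvOutOf (groups : List (Option String × List String)) : List String :=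
  groups.foldl (fun out g => (if out ≠ [] then out ++ [""] else out) ++ g.2) []

lemma splitUpIncludes_alt_eq (includes : List String) :
    splitUpIncludes_alt includes = pvOutOf (pvGroupsOf includes) := rfl

lemma pvGroupsOf_append (xs : List String) (s : String) :
    pvGroupsOf (xs ++ [s]) = pvAddToGroups (pvGroupsOf xs) s := by
  simp [pvGroupsOf, List.foldl_append]

lemma pvOutOf_append (g : List (Option String × List String)) (grp : Option String × List String) :
    pvOutOf (g ++ [grp]) = (if pvOutOf g ≠ [] then pvOutOf g ++ [""] else pvOutOf g) ++ grp.2 := by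
  simp [pvOutOf, List.foldl_append]

lemma pvA_singleton (s : String) : splitUpIncludes [s] = [s] := by
  rw [splitUpIncludes_eq]
  norm_num [PySem.List.pyRange_one_eq_nil, PySem.List.pyGetD_zero_cons]

lemma pvAlt_singleton (s : String) : splitUpIncludes_alt [s] = [s] := by
  simp [splitUpIncludes_alt, pvAddToGroups]

lemma pvStepA_sep' (includes R : List String) (i : Int) :
    pvStepA includes R i =
      R ++ (if pvKeyOf (PySem.List.pyGetD includes (i - 1) "") =
              pvKeyOf (PySem.List.pyGetD includes i "") then [] else [""]) ++
        [PySem.List.pyGetD includes i ""] := by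
  unfold pvStepA
  have := pvStepA_sep R (PySem.List.pyGetD includes (i - 1) "") (PySem.List.pyGetD includes i "")
  simp only at this ⊢
  rw [this, List.append_assoc]

lemma pvA_append (xs : List String) (s : String) (h : xs ≠ []) :
    splitUpIncludes (xs ++ [s]) =
      splitUpIncludes xs ++
        (if pvKeyOf (xs.getLast h) = pvKeyOf s then [] else [""]) ++ [s] := by
  have hn : 0 < xs.length := List.length_pos_of_ne_nil h
  have hn1 : (1 : Int) ≤ (xs.length : Int) := by exact_mod_cast hn
  rw [splitUpIncludes_eq, splitUpIncludes_eq]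
  have hlen : (((xs ++ [s]).length : Nat) : Int) = (xs.length : Int) + 1 := by
    simp
  rw [hlen, PySem.List.pyRange_one_succ_right hn1, List.foldl_append]
  have h0 : PySem.List.pyGetD (xs ++ [s]) 0 "" = PySem.List.pyGetD xs 0 "" := by
    rw [PySem.List.pyGetD_eq_getElem (xs ++ [s]) "" (by omega)
          (by simp only [List.length_append, List.length_cons, List.length_nil]; push_cast; omega),
        PySem.List.pyGetD_eq_getElem xs "" (by omega) (by exact_mod_cast hn)]
    exact List.getElem_append_left (by omega)
  have hpre : (PySem.List.pyRange 1 (xs.length : Int) 1).foldl (pvStepA (xs ++ [s]))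
        [PySem.List.pyGetD (xs ++ [s]) 0 ""]
      = (PySem.List.pyRange 1 (xs.length : Int) 1).foldl (pvStepA xs)
        [PySem.List.pyGetD xs 0 ""] := by
    rw [h0]
    apply PySem.List.foldl_congr_mem
    intro acc i hi
    rw [PySem.List.mem_pyRange_one] at hi
    have hi1 : (1 : Int) ≤ i := hi.1
    have hi2 : i < (xs.length : Int) := hi.2
    have hc : PySem.List.pyGetD (xs ++ [s]) i "" = PySem.List.pyGetD xs i "" := by
      rw [PySem.List.pyGetD_eq_getElem (xs ++ [s]) "" (by omega)
            (by simp only [List.length_append, List.length_cons, List.length_nil]; push_cast; omega),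
          PySem.List.pyGetD_eq_getElem xs "" (by omega) hi2]
      exact List.getElem_append_left (by omega)
    have hl : PySem.List.pyGetD (xs ++ [s]) (i - 1) "" = PySem.List.pyGetD xs (i - 1) "" := by
      rw [PySem.List.pyGetD_eq_getElem (xs ++ [s]) "" (by omega)
            (by simp only [List.length_append, List.length_cons, List.length_nil]; push_cast; omega),
          PySem.List.pyGetD_eq_getElem xs "" (by omega) (by omega)]
      exact List.getElem_append_left (by omega)
    rw [pvStepA_sep', pvStepA_sep', hc, hl]
  rw [hpre]
  simp only [List.foldl_cons, List.foldl_nil]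
  rw [pvStepA_sep']
  have hcur : PySem.List.pyGetD (xs ++ [s]) ((xs.length : Nat) : Int) "" = s := by
    rw [PySem.List.pyGetD_eq_getElem (xs ++ [s]) "" (by omega)
          (by simp only [List.length_append, List.length_cons, List.length_nil]; push_cast; omega)]
    exact List.getElem_concat_length (by simp) _
  have hlast : PySem.List.pyGetD (xs ++ [s]) (((xs.length : Nat) : Int) - 1) "" = xs.getLast h := by
    rw [PySem.List.pyGetD_eq_getElem (xs ++ [s]) "" (by omega)
          (by simp only [List.length_append, List.length_cons, List.length_nil]; push_cast; omega)]
    rw [List.getLast_eq_getElem, List.getElem_append_left (by omega)]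
    exact getElem_congr rfl (by omega) (by omega)
  rw [hcur, hlast]

theorem pv_main (xs : List String) :
    (pvGroupsOf xs).getLast?.map Prod.fst = xs.getLast?.map pvKeyOf ∧
    (splitUpIncludes_alt xs = [] ↔ xs = []) ∧
    (xs ≠ [] → splitUpIncludes xs = splitUpIncludes_alt xs) := by
  induction xs using List.reverseRecOn with
  | nil => exact ⟨rfl, by simp [splitUpIncludes_alt], by simp⟩
  | append_singleton ys s ih =>
    by_cases hy : ys = []
    · subst hy
      refine ⟨?_, ?_, fun _ => ?_⟩
      · simp [pvGroupsOf, pvAddToGroups]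
      · simp [pvAlt_singleton]
      · simp [pvA_singleton, pvAlt_singleton]
    · obtain ⟨ihK, ihE, ihA⟩ := ih
      have hgl : ys.getLast? = some (ys.getLast hy) := List.getLast?_eq_some_getLast hy
      rw [hgl] at ihK
      simp only [Option.map_some] at ihK
      obtain ⟨lastG, hglast, hfst⟩ : ∃ lastG, (pvGroupsOf ys).getLast? = some lastG ∧
          lastG.1 = pvKeyOf (ys.getLast hy) := by
        cases hg : (pvGroupsOf ys).getLast? with
        | none => rw [hg] at ihK; simp at ihK
        | some lastG => rw [hg] at ihK; simp at ihK; exact ⟨lastG, rfl, ihK⟩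
      have hne : pvGroupsOf ys ≠ [] := by
        intro hnil; rw [hnil] at hglast; simp at hglast
      have hlastEq : (pvGroupsOf ys).getLast hne = lastG := by
        have h2 := List.getLast?_eq_some_getLast hne
        rw [h2] at hglast
        exact Option.some.inj hglast
      have hgdecomp : (pvGroupsOf ys).dropLast ++ [lastG] = pvGroupsOf ys := by
        rw [← hlastEq]
        exact List.dropLast_append_getLast hne
      have haltE : splitUpIncludes_alt ys ≠ [] := fun hnil => hy (ihE.mp hnil)
      have haltE' : pvOutOf (pvGroupsOf ys) ≠ [] := by
        rw [← splitUpIncludes_alt_eq]; exact haltE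
      have hA := pvA_append ys s hy
      have hG := pvGroupsOf_append ys s
      by_cases hk : lastG.1 = pvKeyOf s
      · -- same key: B appends into the last group
        have hstep : pvAddToGroups (pvGroupsOf ys) s =
            (pvGroupsOf ys).dropLast ++ [(lastG.1, lastG.2 ++ [s])] := by
          simp [pvAddToGroups, hglast, hk]
        have hout : pvOutOf (pvGroupsOf (ys ++ [s])) = pvOutOf (pvGroupsOf ys) ++ [s] := by
          rw [hG, hstep]
          conv_rhs => rw [← hgdecomp]
          rw [pvOutOf_append, pvOutOf_append]
          simp [List.append_assoc]
        refine ⟨?_, ?_, fun _ => ?_⟩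
        · rw [hG, hstep]
          simp [hk]
        · rw [splitUpIncludes_alt_eq, hout]
          simp
        · rw [hA, splitUpIncludes_alt_eq, hout, ← splitUpIncludes_alt_eq, ihA hy]
          rw [hfst] at hk
          simp [hk]
      · -- different key: B opens a new group, the join inserts ""
        have hstep : pvAddToGroups (pvGroupsOf ys) s =
            pvGroupsOf ys ++ [(pvKeyOf s, [s])] := by
          simp [pvAddToGroups, hglast, hk]
        have hout : pvOutOf (pvGroupsOf (ys ++ [s])) =
            pvOutOf (pvGroupsOf ys) ++ [""] ++ [s] := by
          rw [hG, hstep, pvOutOf_append]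
          simp [haltE']
        refine ⟨?_, ?_, fun _ => ?_⟩
        · rw [hG, hstep]; simp
        · rw [splitUpIncludes_alt_eq, hout]; simp
        · rw [hA, splitUpIncludes_alt_eq, hout, ← splitUpIncludes_alt_eq, ihA hy]
          rw [hfst] at hk
          simp [hk]

-- ===== VERDICT (by name: the statement is the Claim_ definition above) =====
theorem splitUpIncludes_spec : Claim_equal_splitUpIncludes := by
  intro includes _ hpre
  exact (pv_main includes).2.2 hpre
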